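-- pv_equiv track=rewrite | github.com/VachaganGrigoryan/tasgi | src/tasgi/routing.py | _same_route_shape
-- ===== SOURCE A (Python) =====
-- def _same_route_shape(
--     left_segments: tuple[str, ...],
--     right_segments: tuple[str, ...],
-- ) -> bool:
--     if len(left_segments) != len(right_segments):
--         return False
--
--     for left, right in zip(left_segments, right_segments):
--         left_is_param = left.startswith("{") and left.endswith("}")
--         right_is_param = right.startswith("{") and right.endswith("}")
--         if left_is_param != right_is_param:
--             return False
--         if not left_is_param and left != right:
--             return False
--     return True
-- ===== SOURCE B (Python) =====
-- def _is_param(segment):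
--     return segment.startswith("{") and segment.endswith("}")
--
--
-- def _profile(segments):
--     # positions of the parameter slots, and the literal segments in order
--     params = [i for i, s in enumerate(segments) if _is_param(s)]
--     literals = [s for s in segments if not _is_param(s)]
--     return len(segments), params, literals
--
--
-- def _same_route_shape(left_segments, right_segments):
--     return _profile(left_segments) == _profile(right_segments)
-- ===== Notes on version B (the rewrite author's own statement) =====
-- stated objective: alternative
-- what changed: Instead of walking the two sides in lockstep, B extracts from each side independently a profile (length, list of parameter-slot indices, list of literal segments in order) and compares the two profiles; two routes have the same shape iff their profiles coincide.
import Mathlib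
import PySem

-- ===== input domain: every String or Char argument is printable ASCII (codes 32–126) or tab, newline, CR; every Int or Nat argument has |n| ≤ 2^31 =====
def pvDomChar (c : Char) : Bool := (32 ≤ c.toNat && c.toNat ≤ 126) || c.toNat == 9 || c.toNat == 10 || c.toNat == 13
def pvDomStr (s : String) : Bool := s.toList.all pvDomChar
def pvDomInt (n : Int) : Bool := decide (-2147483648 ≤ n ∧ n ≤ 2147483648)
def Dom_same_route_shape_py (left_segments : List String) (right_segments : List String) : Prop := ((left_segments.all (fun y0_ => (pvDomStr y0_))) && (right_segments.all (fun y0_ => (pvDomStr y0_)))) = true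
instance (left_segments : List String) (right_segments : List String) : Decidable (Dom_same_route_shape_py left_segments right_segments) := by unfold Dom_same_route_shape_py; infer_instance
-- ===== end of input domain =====

-- B compares per-side profiles (length, parameter-slot indices, literal subsequence) instead of walking the two sides in lockstep; alternative decomposition, same O(n).

-- ===== PORT A =====
-- left.startswith("{") and left.endswith("}")
def pvIsParam (s : String) : Bool :=
  PySem.Str.startswith s "{" && PySem.Str.endswith s "}"

-- the 'for left, right in zip(...)' loop with its early returns
def pvLoopA : List (String × String) → Bool
  | [] => true
  | (left, right) :: rest =>
    let left_is_param := pvIsParam left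
    let right_is_param := pvIsParam right
    if left_is_param ≠ right_is_param then false
    else if !left_is_param && left ≠ right then false
    else pvLoopA rest

def same_route_shape_py (left_segments : List String) (right_segments : List String) : Bool :=
  if left_segments.length ≠ right_segments.length then false
  else pvLoopA (left_segments.zip right_segments)

-- ===== PORT B =====
-- _profile: (len(segments), indices of param slots, literal segments in order)
def pvProfile (segments : List String) : Int × List Int × List String :=
  ((segments.length : Int),
   (PySem.List.enumerate segments).filterMap
     (fun p => if pvIsParam p.2 then some p.1 else none),
   segments.filter (fun s => !pvIsParam s))

def same_route_shape_py_alt (left_segments : List String) (right_segments : List String) : Bool :=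
  pvProfile left_segments == pvProfile right_segments

-- ===== PRECONDITION & SPEC =====
def Spec_same_route_shape_py (left_segments : List String) (right_segments : List String) (out : Bool) : Prop := out = same_route_shape_py_alt left_segments right_segments
instance (left_segments : List String) (right_segments : List String) (out : Bool) : Decidable (Spec_same_route_shape_py left_segments right_segments out) := by unfold Spec_same_route_shape_py; infer_instance

-- ===== CLAIM =====
def Claim_equal_same_route_shape_py : Prop := ∀ (left_segments : List String) (right_segments : List String), Dom_same_route_shape_py left_segments right_segments → Spec_same_route_shape_py left_segments right_segments (same_route_shape_py left_segments right_segments)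

-- ===== LEMMAS AND PROOFS =====

def pvParams (k : Int) (l : List String) : List Int :=
  (PySem.List.enumerate l k).filterMap (fun p => if pvIsParam p.2 then some p.1 else none)

theorem pvParams_nil (k : Int) : pvParams k [] = [] := rfl

theorem pvParams_cons (k : Int) (a : String) (l : List String) :
    pvParams k (a :: l) =
      if pvIsParam a then k :: pvParams (k+1) l else pvParams (k+1) l := by
  by_cases hp : pvIsParam a <;>
    simp [pvParams, PySem.List.enumerate_cons, hp]

theorem pvParams_ge (k : Int) (l : List String) : ∀ i ∈ pvParams k l, k ≤ i := by
  induction l generalizing k with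
  | nil => simp [pvParams_nil]
  | cons a l ih =>
    intro i hi
    rw [pvParams_cons] at hi
    split at hi
    · rcases List.mem_cons.mp hi with h | h
      · omega
      · have := ih (k+1) i h; omega
    · have := ih (k+1) i hi; omega

theorem pvParams_head_ne (k : Int) (xs : List Int) (r : List String) :
    ((k :: xs) == pvParams (k+1) r) = false := by
  rw [beq_eq_false_iff_ne]
  intro hc
  have : k ∈ pvParams (k+1) r := by rw [← hc]; simp
  have := pvParams_ge (k+1) r k this
  omega

theorem pvParams_head_ne' (k : Int) (xs : List Int) (r : List String) :
    (pvParams (k+1) r == (k :: xs)) = false := by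
  rw [beq_eq_false_iff_ne]
  intro hc
  have : k ∈ pvParams (k+1) r := by rw [hc]; simp
  have := pvParams_ge (k+1) r k this
  omega

theorem pvLoop_eq_profile (k : Int) (l r : List String) (h : l.length = r.length) :
    pvLoopA (l.zip r) =
      ((pvParams k l == pvParams k r) &&
       (l.filter (fun s => !pvIsParam s) == r.filter (fun s => !pvIsParam s))) := by
  induction l generalizing r k with
  | nil =>
    cases r with
    | nil => rfl
    | cons b bs => simp at h
  | cons a as ih =>
    cases r with
    | nil => simp at h
    | cons b bs =>
      simp only [List.length_cons, Nat.add_right_cancel_iff] at h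
      simp only [List.zip_cons_cons, pvLoopA, pvParams_cons, List.filter_cons]
      cases hpa : pvIsParam a <;> cases hpb : pvIsParam b
      · -- neither param
        by_cases hab : a = b
        · subst hab
          simp [ih (k+1) bs h, List.cons_beq_cons]
        · simp [hab, List.cons_beq_cons]
      · -- a literal, b param
        simp [pvParams_head_ne' k _ as]
      · -- a param, b literal
        simp [pvParams_head_ne k _ bs]
      · -- both params
        simp [ih (k+1) bs h, List.cons_beq_cons]

theorem profile_len_ne (l r : List String) (h : l.length ≠ r.length) :
    same_route_shape_py_alt l r = false := by
  simp [same_route_shape_py_alt, pvProfile, Prod.ext_iff]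
  intro hc
  exact absurd (by exact_mod_cast hc) h

-- ===== VERDICT =====
theorem same_route_shape_py_spec : Claim_equal_same_route_shape_py := by
  intro l r _
  unfold Spec_same_route_shape_py
  by_cases h : l.length = r.length
  · simp only [same_route_shape_py, same_route_shape_py_alt, pvProfile, h, ne_eq,
      not_true_eq_false, if_false]
    rw [pvLoop_eq_profile 0 l r h]
    rw [Bool.eq_iff_iff]
    simp [Prod.mk.injEq, pvParams]
  · simp [same_route_shape_py, h, profile_len_ne l r h]
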